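-- pv_equiv track=rewrite | github.com/AUGUSTUS-POMERLEAU/choose-your-own-adventure-project | dialogueTest.py | choice_dict
-- ===== SOURCE A (Python) =====
-- def choice_dict(list_lines, level):
--     options = [x for x in list_lines if "->" in x and get_level(x) == level]
--     choice = {}
--     index = 0
--     for i in range(len(options)):
--         choice[i + 1] = (options[i].strip(),[])
--         for line in list_lines[list_lines.index(options[i]):]:
--             if i != len(options) - 1:
--                 if line == options[i + 1]:
--                     break
--             if get_level(line) > level:
--                 choice[i + 1][1].append(line)
--         index += 1
--     return choice
--
-- def get_level(line):
--     i = 0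
--     for char in [x for x in line if x == "\t"]:
--         i += 1
--     return i
-- ===== SOURCE B (Python) =====
-- def choice_dict(list_lines, level):
--     groups = []
--     for line in list_lines:
--         if "->" in line and line.count("\t") == level:
--             groups.append((line.strip(), []))
--         elif groups and line.count("\t") > level:
--             groups[-1][1].append(line)
--     return {i + 1: g for i, g in enumerate(groups)}
-- ===== Notes on version B (the rewrite author's own statement) =====
-- stated objective: alternative
-- what changed: A rescans the whole line list for every option (list.index plus a slice walked until the next option); B makes one linear sweep that opens a group at each option line and appends deeper-indented lines to the last open group, then numbers the groups. Pre_ excludes lists containing two equal option lines at the given level, on which A's first-occurrence list.index lookup and value-equality break assign children to an accidental duplicate.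
import Mathlib
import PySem

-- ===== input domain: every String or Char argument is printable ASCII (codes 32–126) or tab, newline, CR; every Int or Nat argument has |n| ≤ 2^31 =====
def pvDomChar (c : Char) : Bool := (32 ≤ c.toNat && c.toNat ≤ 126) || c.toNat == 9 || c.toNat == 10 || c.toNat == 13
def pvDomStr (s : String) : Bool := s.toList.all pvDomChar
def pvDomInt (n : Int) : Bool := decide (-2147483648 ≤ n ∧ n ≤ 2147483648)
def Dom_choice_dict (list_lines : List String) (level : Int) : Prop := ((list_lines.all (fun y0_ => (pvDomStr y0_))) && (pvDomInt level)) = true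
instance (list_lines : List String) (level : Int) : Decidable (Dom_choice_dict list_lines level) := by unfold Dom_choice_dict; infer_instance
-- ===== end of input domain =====

-- B replaces A's per-option rescans of the whole list (list.index + a slice walked to the
-- next option) by ONE linear sweep that opens a group at each option line and appends
-- deeper-indented lines to the last open group; objective: alternative (single pass).

-- ===== PORT A =====
-- get_level: i = 0; for char in [x for x in line if x == "\t"]: i += 1
def get_level (line : String) : Int :=
  (line.toList.filter (fun x => x == '\t')).foldl (fun i _ => i + 1) 0

-- the inner "for line in list_lines[...:]" loop with its break, as structural recursion
def choiceInner (level : Int) (stop? : Option String) : List String → List String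
  | [] => []
  | line :: rest =>
    if stop? = some line then []
    else if get_level line > level then line :: choiceInner level stop? rest
    else choiceInner level stop? rest

def choice_dict (list_lines : List String) (level : Int) : List (Int × String × List String) :=
  let options := list_lines.filter (fun x => PySem.Str.isIn "->" x && (get_level x == level))
  -- choice[i+1] is created as (strip, []) and its list then filled by the inner loop's appends;
  -- ported as one insert of the finished pair (the key i+1 is fresh each iteration).
  -- A's local 'index' is never read and is omitted.  list_lines.index(...) always succeeds
  -- here (options[i] ∈ list_lines), so '.getD 0' is never the default.
  let choice : PySem.Dict Int (String × List String) :=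
    (PySem.List.pyRange 0 (PySem.List.len options) 1).foldl
      (fun choice i =>
        choice.insert (i + 1)
          (PySem.Str.strip (PySem.List.pyGetD options i ""),
           choiceInner level
             (if i ≠ PySem.List.len options - 1 then some (PySem.List.pyGetD options (i + 1) "") else none)
             (PySem.List.slice list_lines
               (some (((PySem.List.index? list_lines (PySem.List.pyGetD options i "")).getD 0 : Nat) : Int)) none)))
      PySem.Dict.empty
  choice.items

-- ===== PORT B =====
-- one step of B's sweep: open a new group on an option line, else append to the last group
def sweepStep (level : Int) (groups : List (String × List String)) (line : String) : List (String × List String) :=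
  if PySem.Str.isIn "->" line && ((PySem.Str.count line "\t" : Int) == level) then
    groups ++ [(PySem.Str.strip line, ([] : List String))]
  else if !groups.isEmpty && decide ((PySem.Str.count line "\t" : Int) > level) then
    match groups.getLast? with
    | some g => groups.dropLast ++ [(g.1, g.2 ++ [line])]   -- groups[-1][1].append(line)
    | none => groups                                        -- unreachable: guarded by !groups.isEmpty
  else groups

def choice_dict_alt (list_lines : List String) (level : Int) : List (Int × String × List String) :=
  let groups := list_lines.foldl (sweepStep level) []
  -- {i + 1: g for i, g in enumerate(groups)}: the keys i+1 are distinct, so the dict is this list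
  (PySem.List.enumerate groups 0).map (fun p => (p.1 + 1, p.2))

-- ===== PRECONDITION & SPEC =====
-- Pre_ excludes lists containing two equal option lines at the given level, on which A's
-- first-occurrence list.index lookup and value-equality break assign children to an
-- accidental duplicate (a defensible-corner artefact); B groups each occurrence in place.
def Pre_choice_dict (list_lines : List String) (level : Int) : Prop :=
  (list_lines.filter (fun x => PySem.Str.isIn "->" x && ((x.toList.count '\t' : Int) == level))).Nodup
instance (list_lines : List String) (level : Int) : Decidable (Pre_choice_dict list_lines level) := by
  unfold Pre_choice_dict; infer_instance

def pvWitness_choice_dict : List String × Int := (["intro", "a -> b", "\tchild", "\t\tdeep", "c -> d", "\tother"], 0)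

def Spec_choice_dict (list_lines : List String) (level : Int) (out : List (Int × String × List String)) : Prop := out = choice_dict_alt list_lines level
instance (list_lines : List String) (level : Int) (out : List (Int × String × List String)) : Decidable (Spec_choice_dict list_lines level out) := by unfold Spec_choice_dict; infer_instance

-- ===== CLAIM (what is proved, stated in full; the proofs are below) =====
def Claim_equal_choice_dict : Prop := ∀ (list_lines : List String) (level : Int), Dom_choice_dict list_lines level → Pre_choice_dict list_lines level → Spec_choice_dict list_lines level (choice_dict list_lines level)

-- ===== LEMMAS AND PROOFS =====

-- the option / child predicates, in one normal form used by all proofs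
def optP (lv : Int) (x : String) : Bool := PySem.Str.isIn "->" x && ((x.toList.count '\t' : Int) == lv)
def chP (lv : Int) (x : String) : Bool := decide ((x.toList.count '\t' : Int) > lv)

-- the common reference: group each option line with the deeper lines before the next option
def grp (lv : Int) : List String → List (String × List String)
  | [] => []
  | x :: rest =>
    if optP lv x then
      (PySem.Str.strip x, (rest.takeWhile (fun y => !optP lv y)).filter (chP lv))
        :: grp lv (rest.dropWhile (fun y => !optP lv y))
    else grp lv rest
termination_by l => l.length
decreasing_by
  · exact Nat.lt_succ_of_le (List.length_dropWhile_le _ _)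
  · simp

-- A's entries, recursively over the option list (stop line = next option, tail from idxOf)
def entsA (lv : Int) (lines : List String) : List String → List (String × List String)
  | [] => []
  | o :: os =>
    (PySem.Str.strip o, choiceInner lv os.head? (lines.drop (lines.idxOf o))) :: entsA lv lines os

theorem length_entsA (lv : Int) (lines os : List String) : (entsA lv lines os).length = os.length := by
  induction os with
  | nil => rfl
  | cons o os ih => simp [entsA, ih]

theorem get_level_eq (x : String) : get_level x = (x.toList.count '\t' : Int) := by
  unfold get_level
  rw [PySem.List.foldl_add (g := fun _ => (1 : Int))]
  simp [List.count_eq_countP, ← List.countP_eq_length_filter]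

theorem countGo_single (c : Char) : ∀ (fuel : Nat) (l : List Char) (acc : Nat),
    l.length ≤ fuel → PySem.Chars.count.go [c] fuel l acc = acc + l.count c := by
  intro fuel
  induction fuel with
  | zero => intro l acc h; simp at h; subst h; simp [PySem.Chars.count.go]
  | succ n ih =>
    intro l acc h
    match l with
    | [] => simp [PySem.Chars.count.go]
    | x :: t =>
      rw [PySem.Chars.count.go]
      by_cases hx : x = c
      · subst hx
        simp [List.isPrefixOf, ih t (acc + 1) (by simpa using h)]
        omega
      · simp [List.isPrefixOf, hx, ih t acc (by simpa using h)]
        simp [Ne.symm hx]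

theorem strCount_tab (x : String) : PySem.Str.count x "\t" = x.toList.count '\t' := by
  rw [PySem.Str.count_eq]
  show PySem.Chars.count x.toList ['\t'] = _
  simp [PySem.Chars.count]
  exact (countGo_single '\t' x.toList.length x.toList 0 le_rfl).trans (by omega)

-- choiceInner characterisations
theorem choiceInner_none (lv : Int) (ls : List String) :
    choiceInner lv none ls = ls.filter (chP lv) := by
  induction ls with
  | nil => rfl
  | cons a t ih =>
    simp only [choiceInner, List.filter_cons]
    rw [get_level_eq]
    by_cases h : (a.toList.count '\t' : Int) > lv
    · simp [h, chP, ih]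
    · simp [h, chP, ih]

theorem choiceInner_split (lv : Int) (s : String) (l₁ l₂ : List String) (hm : s ∉ l₁) :
    choiceInner lv (some s) (l₁ ++ s :: l₂) = l₁.filter (chP lv) := by
  induction l₁ with
  | nil => simp [choiceInner]
  | cons a t ih =>
    have hne : s ≠ a := fun h => hm (h ▸ List.mem_cons_self)
    simp only [List.cons_append, choiceInner, List.filter_cons]
    rw [get_level_eq]
    have : ¬ (some s = some a) := by simp [hne]
    by_cases h : (a.toList.count '\t' : Int) > lv
    · simp [this, h, chP, ih (fun hmt => hm (List.mem_cons_of_mem _ hmt))]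
    · simp [this, h, chP, ih (fun hmt => hm (List.mem_cons_of_mem _ hmt))]

-- entsA only looks at lines through drop ∘ idxOf
theorem entsA_congr (lv : Int) (lines lines' : List String) (os : List String)
    (h : ∀ o ∈ os, lines.drop (lines.idxOf o) = lines'.drop (lines'.idxOf o)) :
    entsA lv lines os = entsA lv lines' os := by
  induction os with
  | nil => rfl
  | cons o os ih =>
    simp only [entsA]
    rw [h o List.mem_cons_self, ih (fun o' ho' => h o' (List.mem_cons_of_mem _ ho'))]

theorem idxOf?_eq_some_of_mem (v : String) (l : List String) (h : v ∈ l) :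
    List.idxOf? v l = some (List.idxOf v l) := by
  induction l with
  | nil => simp at h
  | cons a t ih =>
    have hb : (a == v) = decide (a = v) := by by_cases hv : a = v <;> simp [hv]
    by_cases hv : a = v
    · subst hv; simp [List.idxOf?_cons]
    · simp [List.idxOf?_cons, hb, hv, ih (by simpa [Ne.symm hv] using h)]

theorem dropWhile_cons_head (p : String → Bool) (l : List String) (y : String) (t : List String)
    (h : l.dropWhile p = y :: t) : p y = false := by
  induction l with
  | nil => simp at h
  | cons a l ih =>
    rw [List.dropWhile_cons] at h
    by_cases hp : p a
    · simp [hp] at h; exact ih h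
    · simp [hp] at h; rw [h.1] at hp; simpa using hp

theorem chP_of_optP (lv : Int) (x : String) (h : optP lv x = true) : chP lv x = false := by
  have h2 := (Bool.and_eq_true _ _).mp h |>.2
  simp only [beq_iff_eq] at h2
  simp [chP, h2]

-- MAIN: on a list whose option lines are pairwise distinct, A's entries are the groups
theorem entsA_filter_eq_grp (lv : Int) (lines : List String) :
    (lines.filter (optP lv)).Nodup →
    entsA lv lines (lines.filter (optP lv)) = grp lv lines := by
  induction lines using grp.induct lv with
  | case1 => intro _; simp [entsA, grp]
  | case2 x rest ho ih =>
    intro hnd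
    have f1 : (x :: rest).filter (optP lv) = x :: rest.filter (optP lv) := by
      simp [ho]
    have f2 : rest = rest.takeWhile (fun y => !optP lv y) ++ rest.dropWhile (fun y => !optP lv y) :=
      (List.takeWhile_append_dropWhile).symm
    have f3 : ∀ y ∈ rest.takeWhile (fun y => !optP lv y), optP lv y = false := by
      intro y hy
      have := List.mem_takeWhile_imp hy
      simpa using this
    have f4 : (rest.takeWhile (fun y => !optP lv y)).filter (optP lv) = [] := by
      rw [List.filter_eq_nil_iff]; intro y hy; simp [f3 y hy]
    have f5 : rest.filter (optP lv) = (rest.dropWhile (fun y => !optP lv y)).filter (optP lv) := by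
      conv_lhs => rw [f2]
      rw [List.filter_append, f4, List.nil_append]
    rw [f1] at hnd
    have hx_notin : x ∉ rest.filter (optP lv) := (List.nodup_cons.mp hnd).1
    have hnd_rest : (rest.filter (optP lv)).Nodup := (List.nodup_cons.mp hnd).2
    have chPx : chP lv x = false := chP_of_optP lv x ho
    cases hdw : rest.dropWhile (fun y => !optP lv y) with
    | nil =>
      have hfe : rest.filter (optP lv) = [] := by rw [f5, hdw]; rfl
      have htw : rest.takeWhile (fun y => !optP lv y) = rest := by
        conv_rhs => rw [f2]
        rw [hdw, List.append_nil]
      rw [f1, hfe]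
      simp only [entsA, List.head?_nil]
      rw [List.idxOf_cons_self, List.drop_zero, choiceInner_none]
      rw [grp]
      simp only [ho, if_pos]
      rw [hdw, htw]
      simp [grp, chPx]
    | cons y dw' =>
      have hne : rest.dropWhile (fun y => !optP lv y) ≠ [] := by simp [hdw]
      have hy : optP lv y = true := by
        have h := dropWhile_cons_head (fun y => !optP lv y) rest y dw' hdw
        simpa using h
      have f6 : (rest.dropWhile (fun y => !optP lv y)).filter (optP lv) = y :: dw'.filter (optP lv) := by
        rw [hdw, List.filter_cons]; simp [hy]
      have hyx : y ≠ x := by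
        intro h
        exact hx_notin (by rw [f5, f6, ← h]; exact List.mem_cons_self)
      have hsplit : (x :: rest) = (x :: rest.takeWhile (fun y => !optP lv y)) ++ y :: dw' := by
        conv_lhs => rw [show rest = rest.takeWhile (fun y => !optP lv y) ++ rest.dropWhile (fun y => !optP lv y) from f2]
        rw [hdw]
        rfl
      have hy_notin : y ∉ x :: rest.takeWhile (fun y => !optP lv y) := by
        intro hmem
        rcases List.mem_cons.mp hmem with h | h
        · exact hyx h
        · rw [f3 y h] at hy; exact Bool.false_ne_true hy
      -- unfold one entry of entsA
      rw [f1, f5, f6, entsA]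
      simp only [List.head?_cons, List.idxOf_cons_self, List.drop_zero]
      have hhead : choiceInner lv (some y) (x :: rest)
          = (List.takeWhile (fun y => !optP lv y) rest).filter (chP lv) := by
        conv_lhs => rw [hsplit]
        rw [show x :: List.takeWhile (fun y => !optP lv y) rest ++ y :: dw'
              = (x :: List.takeWhile (fun y => !optP lv y) rest) ++ y :: dw' from rfl,
          choiceInner_split lv y _ _ hy_notin]
        rw [List.filter_cons, chPx]
        simp
      have htail : entsA lv (x :: rest) (y :: List.filter (optP lv) dw')
          = grp lv (y :: dw') := by
        have hcongr : entsA lv (x :: rest) (y :: List.filter (optP lv) dw')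
            = entsA lv (y :: dw') (y :: List.filter (optP lv) dw') := by
          apply entsA_congr
          intro o homem
          have hoP : optP lv o = true := by
            rcases List.mem_cons.mp homem with h | h
            · rw [h]; exact hy
            · exact List.of_mem_filter h
          have ho_notin : o ∉ x :: List.takeWhile (fun y => !optP lv y) rest := by
            intro hmem
            rcases List.mem_cons.mp hmem with h | h
            · subst h
              exact hx_notin (by rw [f5, f6]; exact homem)
            · rw [f3 o h] at hoP; exact Bool.false_ne_true hoP
          conv_lhs => rw [hsplit]
          rw [show x :: List.takeWhile (fun y => !optP lv y) rest ++ y :: dw'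
                = (x :: List.takeWhile (fun y => !optP lv y) rest) ++ y :: dw' from rfl]
          rw [List.idxOf_append_of_notMem ho_notin, List.drop_length_add_append]
        have ihnd : ((List.dropWhile (fun y => !optP lv y) rest).filter (optP lv)).Nodup := by
          rw [← f5]; exact hnd_rest
        have ih' := ih ihnd
        rw [f6, hdw] at ih'
        rw [hcongr, ih']
      rw [hhead, htail]
      conv_rhs => rw [grp]
      simp only [ho, if_pos]
      rw [hdw]
  | case3 x rest ho ih =>
    intro hnd
    have f1 : (x :: rest).filter (optP lv) = rest.filter (optP lv) := by
      simp [ho]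
    rw [f1]
    have hcongr : entsA lv (x :: rest) (rest.filter (optP lv)) = entsA lv rest (rest.filter (optP lv)) := by
      apply entsA_congr
      intro o homem
      have hoP : optP lv o = true := List.of_mem_filter homem
      have ho' : optP lv x = false := by simpa using ho
      have hox : o ≠ x := by intro h; rw [h, ho'] at hoP; exact Bool.false_ne_true hoP
      rw [List.idxOf_cons_ne _ (Ne.symm hox), List.drop_succ_cons]
    rw [hcongr, ih (by rw [← f1]; exact (f1 ▸ hnd))]
    conv_rhs => rw [grp]
    have ho' : optP lv x = false := by simpa using ho
    simp [ho']

-- B's sweep: step shapes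
theorem sweepCond1 (lv : Int) (a : String) :
    (PySem.Str.isIn "->" a && ((PySem.Str.count a "\t" : Int) == lv)) = optP lv a := by
  unfold optP; rw [strCount_tab]

theorem sweepCond2 (lv : Int) (a : String) :
    (decide ((PySem.Str.count a "\t" : Int) > lv)) = chP lv a := by
  unfold chP; rw [strCount_tab]

theorem sweepStep_opt (lv : Int) (gs : List (String × List String)) (a : String)
    (h : optP lv a = true) : sweepStep lv gs a = gs ++ [(PySem.Str.strip a, [])] := by
  simp only [sweepStep, sweepCond1]
  simp [h]

theorem sweepStep_nonopt_nil (lv : Int) (a : String) (h : optP lv a = false) :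
    sweepStep lv [] a = [] := by
  simp only [sweepStep, sweepCond1, sweepCond2]
  simp [h]

theorem sweepStep_child (lv : Int) (gs : List (String × List String)) (s : String)
    (ks : List String) (a : String) (h : optP lv a = false) (hc : chP lv a = true) :
    sweepStep lv (gs ++ [(s, ks)]) a = gs ++ [(s, ks ++ [a])] := by
  simp only [sweepStep, sweepCond1, sweepCond2]
  simp [h, hc]

theorem sweepStep_skip (lv : Int) (gs : List (String × List String)) (a : String)
    (h : optP lv a = false) (hc : chP lv a = false) : sweepStep lv gs a = gs := by
  simp only [sweepStep, sweepCond1, sweepCond2]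
  simp [h, hc]

theorem sweep_append (lv : Int) (ls : List String) : ∀ (gs : List (String × List String))
    (s : String) (ks : List String),
    ls.foldl (sweepStep lv) (gs ++ [(s, ks)]) =
      gs ++ [(s, ks ++ (ls.takeWhile (fun y => !optP lv y)).filter (chP lv))]
        ++ grp lv (ls.dropWhile (fun y => !optP lv y)) := by
  induction ls with
  | nil => intro gs s ks; simp [grp]
  | cons a t ih =>
    intro gs s ks
    by_cases ho : optP lv a = true
    · rw [List.foldl_cons, sweepStep_opt lv _ a ho,
        show gs ++ [(s, ks)] ++ [(PySem.Str.strip a, ([] : List String))]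
          = (gs ++ [(s, ks)]) ++ [(PySem.Str.strip a, ([] : List String))] from rfl,
        ih (gs ++ [(s, ks)]) (PySem.Str.strip a) []]
      rw [List.takeWhile_cons, List.dropWhile_cons]
      simp only [ho, Bool.not_true, Bool.false_eq_true, if_false]
      conv_rhs => rw [grp]
      simp only [ho, if_pos]
      simp
    · have ho' : optP lv a = false := by simpa using ho
      rw [List.takeWhile_cons, List.dropWhile_cons]
      simp only [ho', Bool.not_false, if_pos]
      by_cases hc : chP lv a = true
      · rw [List.foldl_cons, sweepStep_child lv gs s ks a ho' hc, ih gs s (ks ++ [a])]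
        rw [List.filter_cons, hc]
        simp
      · have hc' : chP lv a = false := by simpa using hc
        rw [List.foldl_cons, sweepStep_skip lv _ a ho' hc', ih gs s ks]
        rw [List.filter_cons, hc']
        simp

theorem sweep_nil (lv : Int) (ls : List String) :
    ls.foldl (sweepStep lv) [] = grp lv ls := by
  induction ls with
  | nil => simp [grp]
  | cons a t ih =>
    by_cases ho : optP lv a = true
    · rw [List.foldl_cons, sweepStep_opt lv [] a ho, List.nil_append,
        show [(PySem.Str.strip a, ([] : List String))] = [] ++ [(PySem.Str.strip a, ([] : List String))] from rfl,
        sweep_append lv t [] (PySem.Str.strip a) []]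
      conv_rhs => rw [grp]
      simp [ho]
    · have ho' : optP lv a = false := by simpa using ho
      rw [List.foldl_cons, sweepStep_nonopt_nil lv a ho', ih]
      conv_rhs => rw [grp]
      simp [ho']

-- numbering: {i+1: g for i, g in enumerate(L)} as a map over range
theorem numb_aux (α : Type) (L : List α) (d : α) : ∀ (s : Int),
    (PySem.List.enumerate L s).map (fun p => (p.1 + 1, p.2)) =
      (List.range L.length).map (fun (k : Nat) => (s + (k : Int) + 1, L.getD k d)) := by
  induction L with
  | nil => intro s; simp [PySem.List.enumerate]
  | cons x t ih =>
    intro s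
    rw [PySem.List.enumerate_cons, List.map_cons, ih (s + 1)]
    rw [List.length_cons, List.range_succ_eq_map, List.map_cons, List.map_map]
    rw [List.cons_eq_cons]
    refine ⟨by simp, ?_⟩
    apply List.map_congr_left
    intro k _
    simp only [Function.comp_apply, List.getD_cons_succ]
    congr 1
    push_cast
    ring

theorem numb_eq (α : Type) (L : List α) (d : α) :
    (PySem.List.enumerate L 0).map (fun p => (p.1 + 1, p.2)) =
      (List.range L.length).map (fun (k : Nat) => ((k : Int) + 1, L.getD k d)) := by
  rw [numb_aux α L d 0]
  apply List.map_congr_left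
  intro k _
  simp

-- entsA as a map over range (the index form A's loop produces)
theorem entsA_eq_map (lv : Int) (lines : List String) (os : List String) :
    entsA lv lines os =
      (List.range os.length).map (fun k =>
        (PySem.Str.strip (os.getD k ""),
         choiceInner lv os[k+1]? (lines.drop (lines.idxOf (os.getD k ""))))) := by
  induction os with
  | nil => rfl
  | cons o os ih =>
    simp only [entsA, List.length_cons, List.range_succ_eq_map, List.map_cons, List.map_map]
    rw [List.cons_eq_cons]
    refine ⟨by simp [List.head?_eq_getElem?], ?_⟩
    rw [ih]
    apply List.map_congr_left
    intro k _
    simp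

-- A's port computes the numbered groups
theorem A_eq (lines : List String) (lv : Int) (hpre : Pre_choice_dict lines lv) :
    choice_dict lines lv =
      (PySem.List.enumerate (grp lv lines) 0).map (fun p => (p.1 + 1, p.2)) := by
  have hopts : lines.filter (fun x => PySem.Str.isIn "->" x && (get_level x == lv))
      = lines.filter (optP lv) := by
    apply List.filter_congr
    intro x _
    unfold optP
    rw [get_level_eq]
  have hnd : (lines.filter (optP lv)).Nodup := by
    have : (fun x => PySem.Str.isIn "->" x && ((x.toList.count '\t' : Int) == lv)) = optP lv := rfl
    unfold Pre_choice_dict at hpre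
    rw [this] at hpre
    exact hpre
  unfold choice_dict
  rw [hopts]
  set os := lines.filter (optP lv) with hos
  rw [PySem.Dict.items_foldl_insert_fresh _ (fun i => i + 1) _ PySem.Dict.empty
    (by intro a _; exact PySem.Dict.contains_empty _)
    (by
      exact (PySem.List.nodup_pyRange_one 0 (PySem.List.len os)).map (add_left_injective 1))]
  rw [show PySem.Dict.empty.items = ([] : List (Int × String × List String)) from rfl, List.nil_append]
  -- turn the pyRange into List.range
  rw [show PySem.List.len os = (os.length : Int) from by simp, PySem.List.pyRange_one, List.map_map]
  rw [show ((os.length : Int) - 0).toNat = os.length from by omega]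
  -- right side: numbered groups
  rw [numb_eq _ (grp lv lines) ("", []),
    show (grp lv lines).length = os.length from by
      rw [← entsA_filter_eq_grp lv lines hnd, ← hos, length_entsA]]
  apply List.map_congr_left
  intro k hk
  have hk' : k < os.length := List.mem_range.mp hk
  simp only [Function.comp_apply]
  have hget : PySem.List.pyGetD os ((0 : Int) + (k : Int)) "" = os.getD k "" := by
    rw [zero_add, PySem.List.pyGetD_natCast]
  have hmem : os.getD k "" ∈ lines := by
    have : os.getD k "" ∈ os := by
      rw [List.getD_eq_getElem?_getD, List.getElem?_eq_getElem hk']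
      exact List.getElem_mem hk'
    exact List.mem_of_mem_filter (hos ▸ this)
  have hidx : ((PySem.List.index? lines (os.getD k "")).getD 0 : Nat) = lines.idxOf (os.getD k "") := by
    rw [PySem.List.index?_eq_idxOf?, idxOf?_eq_some_of_mem _ _ hmem]
    rfl
  have hstop : (if (0 : Int) + (k : Int) ≠ ((os.length : Int)) - 1
        then some (PySem.List.pyGetD os ((0 : Int) + (k : Int) + 1) "") else none)
      = os[k+1]? := by
    simp only [zero_add]
    by_cases hlast : k + 1 = os.length
    · rw [if_neg (by omega), List.getElem?_eq_none (by omega)]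
    · rw [if_pos (by omega)]
      rw [show (k : Int) + 1 = ((k + 1 : Nat) : Int) from by push_cast; ring,
        PySem.List.pyGetD_natCast]
      rw [List.getElem?_eq_getElem (by omega), List.getD_eq_getElem?_getD,
        List.getElem?_eq_getElem (by omega)]
      rfl
  rw [hget, hstop, hidx, PySem.List.slice_from_natCast]
  -- and the right-hand entry is the k-th group
  rw [← entsA_filter_eq_grp lv lines hnd, ← hos, entsA_eq_map]
  rw [PySem.List.getD_map_range _ _ _ _ hk']
  simp

-- ===== VERDICT (by name: the statement is the Claim_ definition above) =====
theorem choice_dict_spec : Claim_equal_choice_dict := by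
  intro lines lv _hdom hpre
  unfold Spec_choice_dict choice_dict_alt
  rw [A_eq lines lv hpre, sweep_nil]
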